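-- pv_equiv track=rewrite | github.com/farhathrangrez/farhathrangrez | Sum Of Numbers At Prime Factors.py | calculate_weighted_sum
-- ===== SOURCE A (Python) =====
-- def prime_factors(n):
--     factors = {}
--     while n % 2 == 0:
--         if 2 in factors:
--             factors[2] += 1
--         else:
--             factors[2] = 1
--         n //= 2
--     for i in range(3, int(n**0.5) + 1, 2):
--         while n % i == 0:
--             if i in factors:
--                 factors[i] += 1
--             else:
--                 factors[i] = 1
--             n //= i
--     if n > 2:
--         factors[n] = 1
--     return factors
--
-- def calculate_weighted_sum(arr, num):
--     if not arr:
--         return -1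
--     factors = prime_factors(num)
--     total_sum = 0
--     found = False
--     for factor, power in factors.items():
--         if factor < len(arr):
--             total_sum += power * arr[factor]
--             found = True
--     return total_sum if found else 0
-- ===== SOURCE B (Python) =====
-- def calculate_weighted_sum(arr, num):
--     if not arr:
--         return -1
--     total = 0
--     n = num
--     d = 2
--     while d * d <= n:
--         if n % d == 0:
--             n //= d
--             if d < len(arr):
--                 total += arr[d]
--         else:
--             d += 1
--     if n > 1 and n < len(arr):
--         total += arr[n]
--     return total
-- ===== Notes on version B (the rewrite author's own statement) =====
-- stated objective: simpler
-- what changed: Replaces the two-pass design (build a prime-to-power dict via three factorization loops with a fixed sqrt bound, then fold the dict items into a weighted sum with a found flag) by one fused trial-division loop with a single increasing divisor d that adds arr[d] directly at each extraction, handling the leftover prime inline.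
import Mathlib
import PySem

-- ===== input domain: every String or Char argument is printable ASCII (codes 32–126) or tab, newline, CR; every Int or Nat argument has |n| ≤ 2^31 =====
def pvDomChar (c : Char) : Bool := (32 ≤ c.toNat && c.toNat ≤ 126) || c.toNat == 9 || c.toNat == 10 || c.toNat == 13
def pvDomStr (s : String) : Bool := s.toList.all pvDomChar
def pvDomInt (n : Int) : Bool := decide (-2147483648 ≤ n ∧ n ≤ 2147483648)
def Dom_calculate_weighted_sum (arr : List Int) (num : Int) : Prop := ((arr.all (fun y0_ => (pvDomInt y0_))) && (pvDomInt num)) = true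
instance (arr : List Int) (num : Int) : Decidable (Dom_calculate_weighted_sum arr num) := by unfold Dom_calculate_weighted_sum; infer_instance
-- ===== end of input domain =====

-- B fuses A's two passes (prime->power dict, then weighted-sum fold) into one trial-division
-- loop that accumulates the sum directly (objective: simpler).

-- ===== PORT A =====
-- while n % 2 == 0: … ('0 < n' is a totality guard: Python diverges at num = 0 and raises for
-- num < 0, both excluded by Pre_)
def pfTwo (n : Int) (f : PySem.Dict Int Int) : Int × PySem.Dict Int Int :=
  if h : PySem.Int.mod n 2 = 0 ∧ 0 < n then
    pfTwo (PySem.Int.floordiv n 2)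
      (if f.contains 2 then f.insert 2 (f.getD 2 0 + 1) else f.insert 2 1)
  else (n, f)
termination_by n.toNat
decreasing_by
  rw [PySem.Int.floordiv_eq_ediv_of_pos (by norm_num)]
  omega

-- while n % i == 0: … ('0 < n ∧ 1 < i' is a totality guard, always true on reachable states)
def pfI (i n : Int) (f : PySem.Dict Int Int) : Int × PySem.Dict Int Int :=
  if h : PySem.Int.mod n i = 0 ∧ 0 < n ∧ 1 < i then
    pfI i (PySem.Int.floordiv n i)
      (if f.contains i then f.insert i (f.getD i 0 + 1) else f.insert i 1)
  else (n, f)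
termination_by n.toNat
decreasing_by
  obtain ⟨-, h2, h3⟩ := h
  rw [PySem.Int.floordiv_eq_ediv_of_pos (by omega)]
  have hb : (0:Int) < i := by omega
  have hlt : n / i < n := by
    have := Int.emod_nonneg n (by omega : i ≠ 0)
    have := Int.mul_ediv_add_emod n i
    nlinarith [Int.ediv_nonneg h2.le hb.le]
  omega

-- Python's int(n**0.5) is ported as Int.sqrt n: exact for 0 ≤ n ≤ 2^31 (the Dom bound), where
-- the float power is correctly rounded.
def prime_factors (n : Int) : PySem.Dict Int Int :=
  let r1 := pfTwo n PySem.Dict.empty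
  let bound := Int.sqrt r1.1 + 1
  let r2 := (PySem.List.pyRange 3 bound 2).foldl (fun st i => pfI i st.1 st.2) r1
  if r2.1 > 2 then r2.2.insert r2.1 1 else r2.2

def calculate_weighted_sum (arr : List Int) (num : Int) : Int :=
  if arr = [] then -1
  else
    let factors := prime_factors num
    -- arr[factor]: on inputs admitted by Pre_ every key is in [2, len(arr)) here, so pyGet? is some
    let r := factors.items.foldl
      (fun (st : Int × Bool) fk =>
        if fk.1 < (arr.length : Int) then
          (st.1 + fk.2 * (PySem.List.pyGet? arr fk.1).getD 0, true)
        else st) (0, false)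
    if r.2 then r.1 else 0

-- ===== PORT B =====
-- while d * d <= n: … ('1 < d' is a totality guard: d starts at 2 and only increases)
def bLoop (arr : List Int) (n d total : Int) : Int × Int :=
  if h : d * d ≤ n ∧ 1 < d then
    if PySem.Int.mod n d = 0 then
      bLoop arr (PySem.Int.floordiv n d) d
        (if d < (arr.length : Int) then total + (PySem.List.pyGet? arr d).getD 0 else total)
    else bLoop arr n (d + 1) total
  else (n, total)
termination_by (n.toNat, (n - d).toNat)
decreasing_by
  · obtain ⟨h1, h2⟩ := h
    have hn : (0:Int) < n := by nlinarith
    rw [PySem.Int.floordiv_eq_ediv_of_pos (by omega)]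
    have hlt : n / d < n := by
      have := Int.emod_nonneg n (by omega : d ≠ 0)
      have := Int.mul_ediv_add_emod n d
      nlinarith [Int.ediv_nonneg hn.le (by omega : (0:Int) ≤ d)]
    left; omega
  · obtain ⟨h1, h2⟩ := h
    have : d + d ≤ d * d := by nlinarith
    right; omega

def calculate_weighted_sum_alt (arr : List Int) (num : Int) : Int :=
  if arr = [] then -1
  else
    let r := bLoop arr num 2 0
    if 1 < r.1 ∧ r.1 < (arr.length : Int) then r.2 + (PySem.List.pyGet? arr r.1).getD 0 else r.2

-- ===== PRECONDITION & SPEC =====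
-- Pre_ excludes nonempty arr with num ≤ 0: there Python A never returns a value (num = 0 loops
-- forever in the first while loop; num < 0 reaches int() of a complex n**0.5 and raises TypeError).
def Pre_calculate_weighted_sum (arr : List Int) (num : Int) : Prop := arr = [] ∨ 1 ≤ num
instance (arr : List Int) (num : Int) : Decidable (Pre_calculate_weighted_sum arr num) := by
  unfold Pre_calculate_weighted_sum; infer_instance

def pvWitness_calculate_weighted_sum : List Int × Int := ([5, -3, 7, 2, 9], 12)

def Spec_calculate_weighted_sum (arr : List Int) (num : Int) (out : Int) : Prop := out = calculate_weighted_sum_alt arr num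
instance (arr : List Int) (num : Int) (out : Int) : Decidable (Spec_calculate_weighted_sum arr num out) := by unfold Spec_calculate_weighted_sum; infer_instance

-- ===== CLAIM (what is proved, stated in full; the proofs are below) =====
def Claim_equal_calculate_weighted_sum : Prop := ∀ (arr : List Int) (num : Int), Dom_calculate_weighted_sum arr num → Pre_calculate_weighted_sum arr num → Spec_calculate_weighted_sum arr num (calculate_weighted_sum arr num)

-- ===== LEMMAS AND PROOFS =====

-- weight of one prime index
def pvW (arr : List Int) (p : Int) : Int :=
  if p < (arr.length : Int) then (PySem.List.pyGet? arr p).getD 0 else 0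

-- weighted sum of a dict's items list, as A's final fold computes it
def pvItemsW (arr : List Int) (l : List (Int × Int)) : Int :=
  (l.map (fun fk => if fk.1 < (arr.length : Int) then fk.2 * (PySem.List.pyGet? arr fk.1).getD 0 else 0)).sum

-- the common reference value: sum of pvW over the prime factorization (with multiplicity) of n
def pvWsum (arr : List Int) (n : Nat) : Int :=
  if _h4 : 2 ≤ n then pvWsum arr (n / n.minFac) + pvW arr (n.minFac : Int) else 0
termination_by n
decreasing_by exact Nat.div_lt_self (by omega) (Nat.minFac_prime (by omega : n ≠ 1)).one_lt

lemma pvWsum_peel (arr : List Int) (n : Nat) (h : 2 ≤ n) :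
    pvWsum arr n = pvWsum arr (n / n.minFac) + pvW arr (n.minFac : Int) := by
  rw [pvWsum]; simp [h]

lemma pvWsum_small (arr : List Int) (n : Nat) (h : n < 2) : pvWsum arr n = 0 := by
  rw [pvWsum, dif_neg (by omega : ¬ 2 ≤ n)]

lemma pv_minFac_eq (n d : Nat) (hd : 2 ≤ d) (hdvd : d ∣ n) (hn : 2 ≤ n)
    (hmin : ∀ m : Nat, 2 ≤ m → m < d → ¬ m ∣ n) : n.minFac = d := by
  have h1 : n.minFac ≤ d := Nat.minFac_le_of_dvd hd hdvd
  have h2 : n.minFac ∣ n := Nat.minFac_dvd n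
  have h3 : 2 ≤ n.minFac := (Nat.minFac_prime (by omega : n ≠ 1)).two_le
  by_contra hne
  exact hmin n.minFac h3 (by omega) h2

lemma pv_prime_of_no_small (n : Nat) (hn : 2 ≤ n)
    (h : ∀ m : Nat, 2 ≤ m → m * m ≤ n → ¬ m ∣ n) : n.Prime := by
  rw [Nat.prime_def_le_sqrt]
  exact ⟨hn, fun m hm hms => h m hm (Nat.le_sqrt.mp hms)⟩

lemma pvWsum_prime (arr : List Int) (n : Nat) (h : n.Prime) :
    pvWsum arr n = pvW arr (n : Int) := by
  rw [pvWsum_peel arr n h.two_le, h.minFac_eq, Nat.div_self h.pos,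
    pvWsum_small arr 1 (by omega)]
  ring

lemma pv_toNat_ediv (a b : Int) (ha : 0 ≤ a) (hb : 0 ≤ b) : (a / b).toNat = a.toNat / b.toNat := by
  obtain ⟨m, rfl⟩ := Int.eq_ofNat_of_zero_le ha
  obtain ⟨k, rfl⟩ := Int.eq_ofNat_of_zero_le hb
  rw [show ((m:Int) / (k:Int)) = ((m / k : Nat) : Int) from (Int.natCast_ediv m k).symm]
  exact Int.toNat_natCast _

lemma pv_dvd_toNat {i n : Int} (hi : 0 ≤ i) (hn : 0 ≤ n) (h : i ∣ n) : i.toNat ∣ n.toNat := by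
  apply Int.natCast_dvd_natCast.mp
  rw [Int.toNat_of_nonneg hi, Int.toNat_of_nonneg hn]
  exact h

lemma pvItemsW_nil (arr : List Int) : pvItemsW arr [] = 0 := by simp [pvItemsW]

lemma pvItemsW_cons (arr : List Int) (x : Int × Int) (l : List (Int × Int)) :
    pvItemsW arr (x :: l) =
      (if x.1 < (arr.length : Int) then x.2 * (PySem.List.pyGet? arr x.1).getD 0 else 0) + pvItemsW arr l := by
  simp [pvItemsW]

lemma pvItemsW_append (arr : List Int) (l l' : List (Int × Int)) :
    pvItemsW arr (l ++ l') = pvItemsW arr l + pvItemsW arr l' := by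
  simp [pvItemsW]

lemma pvItemsW_map_update (arr : List Int) :
    ∀ (l : List (Int × Int)) (p v : Int), (l.map Prod.fst).Nodup → (p, v) ∈ l →
      pvItemsW arr (l.map fun q => if q.1 == p then (p, v + 1) else q) = pvItemsW arr l + pvW arr p := by
  intro l
  induction l with
  | nil => intro p v _ hm; simp at hm
  | cons x t ih =>
    intro p v hnd hm
    obtain ⟨k, u⟩ := x
    rw [List.map_cons, List.nodup_cons] at hnd
    by_cases hk : k = p
    · subst hk
      have hv : v = u := by
        rcases List.mem_cons.mp hm with h | h
        · exact (Prod.mk.injEq _ _ _ _ ▸ h).2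
        · exact absurd (List.mem_map.mpr ⟨(k, v), h, rfl⟩) hnd.1
      subst hv
      have ht : t.map (fun q => if q.1 == k then (k, v + 1) else q) = t := by
        conv_rhs => rw [← List.map_id t]
        apply List.map_congr_left
        intro q hq
        have : q.1 ≠ k := fun he => hnd.1 (List.mem_map.mpr ⟨q, hq, he⟩)
        simp [this]
      rw [List.map_cons, ht]
      simp only [pvItemsW_cons, pvW, beq_self_eq_true, if_true]
      split_ifs <;> ring
    · have hm' : (p, v) ∈ t := by
        rcases List.mem_cons.mp hm with h | h
        · exact absurd ((Prod.mk.injEq _ _ _ _ ▸ h).1.symm) hk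
        · exact h
      rw [List.map_cons]
      have hne : ((k, u).1 == p) = false := by simp [hk]
      rw [hne]
      simp only [if_false, Bool.false_eq_true]
      rw [pvItemsW_cons, pvItemsW_cons, ih p v hnd.2 hm']
      ring

lemma pvItemsW_inc (arr : List Int) (f : PySem.Dict Int Int) (p : Int) (hnd : f.keys.Nodup) :
    pvItemsW arr ((if f.contains p then f.insert p (f.getD p 0 + 1) else f.insert p 1).items)
      = pvItemsW arr f.items + pvW arr p := by
  by_cases hc : f.contains p
  · rw [if_pos hc]
    obtain ⟨v, hv⟩ : ∃ v, f.get? p = some v := by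
      have h := PySem.Dict.contains_eq_isSome_get? f p
      rw [hc] at h
      exact Option.isSome_iff_exists.mp h.symm
    rw [PySem.Dict.getD_of_get?_eq_some f 0 hv, PySem.Dict.items_insert_of_contains f _ hc]
    have hnd' : (f.items.map Prod.fst).Nodup := by
      have : f.keys = f.items.map Prod.fst := by
        simp [PySem.Dict.keys]
      rwa [this] at hnd
    exact pvItemsW_map_update arr f.items p v hnd' (PySem.Dict.mem_items_of_get?_eq_some f hv)
  · rw [if_neg (by simp [hc]), PySem.Dict.items_insert_of_not_contains f _ (by simp [hc]),
      pvItemsW_append]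
    simp [pvItemsW, pvW]

lemma pvInc_keys (f : PySem.Dict Int Int) (p : Int) :
    ∀ k, k ∈ ((if f.contains p then f.insert p (f.getD p 0 + 1) else f.insert p 1) : PySem.Dict Int Int).keys →
      k ∈ f.keys ∨ k = p := by
  intro k hk
  split at hk <;> rcases (PySem.Dict.mem_keys_insert f p k _).mp hk with h | h <;> tauto

lemma pvInc_nodup (f : PySem.Dict Int Int) (p : Int) (hnd : f.keys.Nodup) :
    ((if f.contains p then f.insert p (f.getD p 0 + 1) else f.insert p 1) : PySem.Dict Int Int).keys.Nodup := by
  split <;> exact PySem.Dict.nodup_keys_insert f p _ hnd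

lemma pv_pyRange_two_cons (a b : Int) (h : a < b) :
    PySem.List.pyRange a b 2 = a :: PySem.List.pyRange (a + 2) b 2 := by
  rw [PySem.List.pyRange_of_pos a b (by norm_num), PySem.List.pyRange_of_pos (a + 2) b (by norm_num)]
  rw [if_pos h]
  have hK : ((b - a + 2 - 1) / 2).toNat
      = (if a + 2 < b then ((b - (a + 2) + 2 - 1) / 2).toNat else 0) + 1 := by
    split_ifs with h2 <;> omega
  rw [hK, List.range_succ_eq_map]
  rw [List.map_cons, List.map_map]
  refine congrArg₂ List.cons (by ring) ?_
  apply List.map_congr_left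
  intro k _
  simp only [Function.comp_apply]
  push_cast
  ring

lemma pv_pyRange_two_nil (a b : Int) (h : ¬ a < b) : PySem.List.pyRange a b 2 = [] := by
  rw [PySem.List.pyRange_of_pos a b (by norm_num), if_neg h]
  simp

-- ---- A-side loop lemmas ----

lemma pfTwo_spec (arr : List Int) :
    ∀ (n : Int) (f : PySem.Dict Int Int), 0 < n → f.keys.Nodup →
      0 < (pfTwo n f).1 ∧ ¬ (2:Int) ∣ (pfTwo n f).1 ∧ (pfTwo n f).1 ∣ n ∧
      (pfTwo n f).2.keys.Nodup ∧ (∀ k, k ∈ (pfTwo n f).2.keys → k ∈ f.keys ∨ k = 2) ∧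
      pvItemsW arr (pfTwo n f).2.items + pvWsum arr (pfTwo n f).1.toNat
        = pvItemsW arr f.items + pvWsum arr n.toNat := by
  intro n f
  induction n, f using pfTwo.induct with
  | case1 n f h ih =>
    obtain ⟨h1, h2⟩ := h
    intro h0 hnd
    simp only [dite_eq_ite] at ih
    have hdvd : (2:Int) ∣ n := (PySem.Int.mod_eq_zero_iff_dvd n 2).mp h1
    have hfd : PySem.Int.floordiv n 2 = n / 2 := PySem.Int.floordiv_eq_ediv_of_pos (by norm_num)
    have h0' : 0 < PySem.Int.floordiv n 2 := by rw [hfd]; omega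
    have hnd' := pvInc_nodup f 2 hnd
    obtain ⟨c1, c2, c3, c4, c5, c6⟩ := ih h0' hnd'
    rw [pfTwo, dif_pos ⟨h1, h2⟩]
    refine ⟨c1, c2, dvd_trans c3 ?_, c4, ?_, ?_⟩
    · rw [hfd]; exact Int.ediv_dvd_of_dvd hdvd
    · intro k hk
      rcases c5 k hk with hk' | hk'
      · rcases pvInc_keys f 2 k hk' with h' | h' <;> tauto
      · tauto
    · rw [c6, pvItemsW_inc arr f 2 hnd]
      have hminf : (n.toNat).minFac = 2 :=
        pv_minFac_eq n.toNat 2 le_rfl (by omega) (by omega) (fun m hm hlt => absurd hlt (by omega))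
      have hpeel := pvWsum_peel arr n.toNat (by omega)
      rw [hminf] at hpeel
      have htn : (PySem.Int.floordiv n 2).toNat = n.toNat / 2 := by
        rw [hfd, pv_toNat_ediv n 2 (by omega) (by norm_num)]
        rfl
      rw [htn, hpeel]
      norm_num
      ring
  | case2 n f h =>
    intro h0 hnd
    rw [pfTwo, dif_neg h]
    have hm : ¬ (2:Int) ∣ n := by
      intro hd
      exact h ⟨(PySem.Int.mod_eq_zero_iff_dvd n 2).mpr hd, h0⟩
    exact ⟨h0, hm, dvd_refl n, hnd, fun k hk => Or.inl hk, rfl⟩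

lemma pfI_spec (arr : List Int) :
    ∀ (i n : Int) (f : PySem.Dict Int Int), 0 < n → 3 ≤ i →
      (∀ m : Int, 2 ≤ m → m < i → ¬ m ∣ n) → f.keys.Nodup →
      0 < (pfI i n f).1 ∧ ¬ i ∣ (pfI i n f).1 ∧
      (∀ m : Int, 2 ≤ m → m < i → ¬ m ∣ (pfI i n f).1) ∧ (pfI i n f).1 ∣ n ∧
      (pfI i n f).2.keys.Nodup ∧ (∀ k, k ∈ (pfI i n f).2.keys → k ∈ f.keys ∨ k = i) ∧
      pvItemsW arr (pfI i n f).2.items + pvWsum arr (pfI i n f).1.toNat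
        = pvItemsW arr f.items + pvWsum arr n.toNat := by
  intro i n f
  induction n, f using pfI.induct i with
  | case1 n f h ih =>
    obtain ⟨h1, h2, h3⟩ := h
    intro h0 hi hinv hnd
    simp only [dite_eq_ite] at ih
    have hdvd : i ∣ n := (PySem.Int.mod_eq_zero_iff_dvd n i).mp h1
    have hfd : PySem.Int.floordiv n i = n / i := PySem.Int.floordiv_eq_ediv_of_pos (by omega)
    have hmul : (n / i) * i = n := Int.ediv_mul_cancel hdvd
    have hnn : 0 ≤ n / i := Int.ediv_nonneg h0.le (by omega)
    have h0' : 0 < PySem.Int.floordiv n i := by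
      rw [hfd]
      rcases hnn.lt_or_eq with hlt | heq
      · exact hlt
      · exfalso
        rw [← hmul, ← heq] at h0
        simp at h0
    have hinv' : ∀ m : Int, 2 ≤ m → m < i → ¬ m ∣ PySem.Int.floordiv n i := by
      intro m hm hlt hdv
      exact hinv m hm hlt (dvd_trans hdv (hfd ▸ Int.ediv_dvd_of_dvd hdvd))
    have hnd' := pvInc_nodup f i hnd
    obtain ⟨c1, c2, c3, c4, c5, c6, c7⟩ := ih h0' hi hinv' hnd'
    rw [pfI, dif_pos ⟨h1, h2, h3⟩]
    refine ⟨c1, c2, c3, dvd_trans c4 (hfd ▸ Int.ediv_dvd_of_dvd hdvd), c5, ?_, ?_⟩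
    · intro k hk
      rcases c6 k hk with hk' | hk'
      · rcases pvInc_keys f i k hk' with h' | h' <;> tauto
      · tauto
    · rw [c7, pvItemsW_inc arr f i hnd]
      have hle : i ≤ n := Int.le_of_dvd h0 hdvd
      have hminN : ∀ m : Nat, 2 ≤ m → m < i.toNat → ¬ m ∣ n.toNat := by
        intro m hm hlt hdv
        have hcast : (m : Int) ∣ n := by
          have := Int.natCast_dvd_natCast.mpr hdv
          rwa [Int.toNat_of_nonneg h0.le] at this
        exact hinv (m : Int) (by exact_mod_cast hm) (by omega) hcast
      have hminf : (n.toNat).minFac = i.toNat :=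
        pv_minFac_eq n.toNat i.toNat (by omega)
          (pv_dvd_toNat (by omega) h0.le hdvd) (by omega) hminN
      have hpeel := pvWsum_peel arr n.toNat (by omega)
      rw [hminf] at hpeel
      have htn : (PySem.Int.floordiv n i).toNat = n.toNat / i.toNat := by
        rw [hfd, pv_toNat_ediv n i (by omega) (by omega)]
      have hci : ((i.toNat : Nat) : Int) = i := Int.toNat_of_nonneg (by omega)
      rw [htn, hpeel, hci]
      ring
  | case2 n f h =>
    intro h0 hi hinv hnd
    rw [pfI, dif_neg h]
    have hm : ¬ i ∣ n := by
      intro hd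
      exact h ⟨(PySem.Int.mod_eq_zero_iff_dvd n i).mpr hd, h0, by omega⟩
    exact ⟨h0, hm, hinv, dvd_refl n, hnd, fun k hk => Or.inl hk, rfl⟩

lemma pfFold_spec (arr : List Int) (b : Int) :
    ∀ (a n : Int) (f : PySem.Dict Int Int), 0 < n → 3 ≤ a → Odd a →
      (∀ m : Int, 2 ≤ m → m < a → ¬ m ∣ n) → f.keys.Nodup →
      (0 < ((PySem.List.pyRange a b 2).foldl (fun st i => pfI i st.1 st.2) (n, f)).1 ∧
       (∀ m : Int, 2 ≤ m → (m < a ∨ m < b) →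
          ¬ m ∣ ((PySem.List.pyRange a b 2).foldl (fun st i => pfI i st.1 st.2) (n, f)).1) ∧
       ((PySem.List.pyRange a b 2).foldl (fun st i => pfI i st.1 st.2) (n, f)).1 ∣ n ∧
       ((PySem.List.pyRange a b 2).foldl (fun st i => pfI i st.1 st.2) (n, f)).2.keys.Nodup ∧
       (∀ k, k ∈ ((PySem.List.pyRange a b 2).foldl (fun st i => pfI i st.1 st.2) (n, f)).2.keys →
          k ∈ f.keys ∨ (3 ≤ k ∧ k < b)) ∧
       pvItemsW arr ((PySem.List.pyRange a b 2).foldl (fun st i => pfI i st.1 st.2) (n, f)).2.items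
         + pvWsum arr ((PySem.List.pyRange a b 2).foldl (fun st i => pfI i st.1 st.2) (n, f)).1.toNat
         = pvItemsW arr f.items + pvWsum arr n.toNat) := by
  suffices H : ∀ (meas : Nat) (a n : Int) (f : PySem.Dict Int Int), (b - a).toNat = meas →
      0 < n → 3 ≤ a → Odd a → (∀ m : Int, 2 ≤ m → m < a → ¬ m ∣ n) → f.keys.Nodup →
      (0 < ((PySem.List.pyRange a b 2).foldl (fun st i => pfI i st.1 st.2) (n, f)).1 ∧
       (∀ m : Int, 2 ≤ m → (m < a ∨ m < b) →
          ¬ m ∣ ((PySem.List.pyRange a b 2).foldl (fun st i => pfI i st.1 st.2) (n, f)).1) ∧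
       ((PySem.List.pyRange a b 2).foldl (fun st i => pfI i st.1 st.2) (n, f)).1 ∣ n ∧
       ((PySem.List.pyRange a b 2).foldl (fun st i => pfI i st.1 st.2) (n, f)).2.keys.Nodup ∧
       (∀ k, k ∈ ((PySem.List.pyRange a b 2).foldl (fun st i => pfI i st.1 st.2) (n, f)).2.keys →
          k ∈ f.keys ∨ (3 ≤ k ∧ k < b)) ∧
       pvItemsW arr ((PySem.List.pyRange a b 2).foldl (fun st i => pfI i st.1 st.2) (n, f)).2.items
         + pvWsum arr ((PySem.List.pyRange a b 2).foldl (fun st i => pfI i st.1 st.2) (n, f)).1.toNat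
         = pvItemsW arr f.items + pvWsum arr n.toNat) by
    intro a n f h0 ha hodd hinv hnd
    exact H (b - a).toNat a n f rfl h0 ha hodd hinv hnd
  intro meas
  induction meas using Nat.strong_induction_on with
  | _ meas IH =>
    intro a n f hmeas h0 ha hodd hinv hnd
    by_cases hab : a < b
    · rw [pv_pyRange_two_cons a b hab]
      simp only [List.foldl_cons]
      obtain ⟨d1, d2, d3, d4, d5, d6, d7⟩ := pfI_spec arr a n f h0 ha hinv hnd
      have hinv2 : ∀ m : Int, 2 ≤ m → m < a + 2 → ¬ m ∣ (pfI a n f).1 := by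
        intro m hm hlt hdv
        rcases lt_trichotomy m a with h' | h' | h'
        · exact d3 m hm h' hdv
        · exact d2 (h' ▸ hdv)
        · obtain ⟨t, ht⟩ := hodd
          have h2m : (2:Int) ∣ m := ⟨t + 1, by omega⟩
          exact d3 2 (by omega) (by omega) (dvd_trans h2m hdv)
      have hodd2 : Odd (a + 2) := by
        obtain ⟨t, ht⟩ := hodd
        exact ⟨t + 1, by omega⟩
      have IHres := IH (b - (a + 2)).toNat (by omega) (a + 2) (pfI a n f).1 (pfI a n f).2 rfl
        d1 (by omega) hodd2 hinv2 d5
      simp only [Prod.mk.eta] at IHres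
      obtain ⟨e1, e2, e3, e4, e5, e6⟩ := IHres
      refine ⟨e1, ?_, dvd_trans e3 d4, e4, ?_, by linarith⟩
      · intro m hm hor
        apply e2 m hm
        omega
      · intro k hk
        rcases e5 k hk with hk' | hk'
        · rcases d6 k hk' with h' | h' <;> [exact Or.inl h'; exact Or.inr ⟨by omega, by omega⟩]
        · exact Or.inr hk'
    · rw [pv_pyRange_two_nil a b hab, List.foldl_nil]
      refine ⟨h0, ?_, dvd_refl n, hnd, fun k hk => Or.inl hk, rfl⟩
      intro m hm hor
      apply hinv m hm
      omega

lemma pvItemsW_eq_prime_factors (arr : List Int) (num : Int) (h : 1 ≤ num) :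
    pvItemsW arr (prime_factors num).items = pvWsum arr num.toNat ∧
    (prime_factors num).keys.Nodup := by
  obtain ⟨a1, a2, a3, a4, a5, a6⟩ :=
    pfTwo_spec arr num PySem.Dict.empty (by omega) PySem.Dict.nodup_keys_empty
  have hinv3 : ∀ m : Int, 2 ≤ m → m < 3 → ¬ m ∣ (pfTwo num PySem.Dict.empty).1 := by
    intro m hm hlt
    have hm2 : m = 2 := by omega
    rw [hm2]; exact a2
  have hsplit := pfFold_spec arr (Int.sqrt (pfTwo num PySem.Dict.empty).1 + 1) 3
    (pfTwo num PySem.Dict.empty).1 (pfTwo num PySem.Dict.empty).2 a1 le_rfl ⟨1, by ring⟩ hinv3 a4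
  simp only [Prod.mk.eta] at hsplit
  obtain ⟨e1, e2, e3, e4, e5, e6⟩ := hsplit
  have hW0 : pvItemsW arr (PySem.Dict.empty : PySem.Dict Int Int).items = 0 := rfl
  set bound := Int.sqrt (pfTwo num PySem.Dict.empty).1 + 1 with hbound
  set r := (PySem.List.pyRange 3 bound 2).foldl (fun st i => pfI i st.1 st.2)
    (pfTwo num PySem.Dict.empty) with hrdef
  have hpf : prime_factors num = if r.1 > 2 then r.2.insert r.1 1 else r.2 := rfl
  rw [hpf]
  by_cases hgt : r.1 > 2
  · rw [if_pos hgt]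
    have hbig : 3 ≤ r.1 ∧ bound ≤ r.1 := by
      by_contra hc
      exact e2 r.1 (by omega) (by omega) (dvd_refl r.1)
    have hle2 : r.1 ≤ (pfTwo num PySem.Dict.empty).1 := Int.le_of_dvd a1 e3
    have hp : r.1.toNat.Prime := by
      apply pv_prime_of_no_small r.1.toNat (by omega)
      intro m hm hmm hdv
      have hcast : (m : Int) ∣ r.1 := by
        have := Int.natCast_dvd_natCast.mpr hdv
        rwa [Int.toNat_of_nonneg (by omega : (0:Int) ≤ r.1)] at this
      have hmsq : m ≤ Nat.sqrt (pfTwo num PySem.Dict.empty).1.toNat :=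
        Nat.le_sqrt.mpr (le_trans hmm (by omega))
      have hmb : (m : Int) < bound := by
        rw [hbound, show Int.sqrt (pfTwo num PySem.Dict.empty).1
          = ((Nat.sqrt (pfTwo num PySem.Dict.empty).1.toNat : Nat) : Int) from rfl]
        omega
      exact e2 (m : Int) (by exact_mod_cast hm) (Or.inr hmb) hcast
    have hmem : r.1 ∉ r.2.keys := by
      intro hk
      rcases e5 r.1 hk with hk' | hk'
      · rcases a5 r.1 hk' with h' | h'
        · rw [PySem.Dict.keys_empty] at h'; simp at h'
        · omega
      · omega
    have hcf : r.2.contains r.1 = false := by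
      cases hc : r.2.contains r.1 with
      | false => rfl
      | true => exact absurd ((PySem.Dict.contains_iff_mem_keys r.2 r.1).mp hc) hmem
    constructor
    · rw [PySem.Dict.items_insert_of_not_contains r.2 1 hcf, pvItemsW_append]
      have hone : pvItemsW arr [(r.1, (1:Int))] = pvW arr r.1 := by
        simp [pvItemsW, pvW]
      have hprime : pvWsum arr r.1.toNat = pvW arr r.1 := by
        rw [pvWsum_prime arr r.1.toNat hp, Int.toNat_of_nonneg (by omega : (0:Int) ≤ r.1)]
      rw [hone]
      rw [hW0] at a6
      linarith
    · exact PySem.Dict.nodup_keys_insert r.2 r.1 1 e4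
  · rw [if_neg hgt]
    have hne2 : r.1 ≠ 2 := by
      intro habs
      exact e2 2 le_rfl (Or.inl (by omega)) (habs ▸ dvd_refl r.1)
    have hone : r.1 = 1 := by omega
    have hz : pvWsum arr r.1.toNat = 0 := pvWsum_small arr r.1.toNat (by omega)
    rw [hW0] at a6
    exact ⟨by linarith, e4⟩

lemma foldA_eq (arr : List Int) :
    ∀ (l : List (Int × Int)) (t : Int) (bo : Bool),
      l.foldl (fun (st : Int × Bool) fk =>
        if fk.1 < (arr.length : Int) then
          (st.1 + fk.2 * (PySem.List.pyGet? arr fk.1).getD 0, true)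
        else st) (t, bo)
      = (t + pvItemsW arr l, bo || l.any (fun fk => decide (fk.1 < (arr.length : Int)))) := by
  intro l
  induction l with
  | nil => intro t bo; simp [pvItemsW_nil]
  | cons x xs ih =>
    intro t bo
    rw [List.foldl_cons, pvItemsW_cons, List.any_cons]
    by_cases hx : x.1 < (arr.length : Int)
    · rw [if_pos hx, ih]
      simp [hx, add_assoc]
    · rw [if_neg hx, ih]
      simp [hx]

lemma pvItemsW_zero_of_none (arr : List Int) (l : List (Int × Int))
    (h : l.any (fun fk => decide (fk.1 < (arr.length : Int))) = false) : pvItemsW arr l = 0 := by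
  induction l with
  | nil => exact pvItemsW_nil arr
  | cons x xs ih =>
    rw [List.any_cons] at h
    rw [pvItemsW_cons, if_neg (by simpa using (Bool.or_eq_false_iff.mp h).1),
      ih (Bool.or_eq_false_iff.mp h).2]
    ring

-- ---- B-side loop lemma ----

lemma bLoop_spec (arr : List Int) :
    ∀ (n d total : Int), 0 < n → 2 ≤ d → (∀ m : Int, 2 ≤ m → m < d → ¬ m ∣ n) →
      (if 1 < (bLoop arr n d total).1 ∧ (bLoop arr n d total).1 < (arr.length : Int)
       then (bLoop arr n d total).2 + (PySem.List.pyGet? arr (bLoop arr n d total).1).getD 0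
       else (bLoop arr n d total).2) = total + pvWsum arr n.toNat := by
  intro n d total
  induction n, d, total using bLoop.induct arr with
  | case1 n d total h hm ih =>
    intro h0 hd hinv
    simp only [dite_eq_ite] at ih
    obtain ⟨hsq, hd1⟩ := h
    have hdvd : d ∣ n := (PySem.Int.mod_eq_zero_iff_dvd n d).mp hm
    have hfd : PySem.Int.floordiv n d = n / d := PySem.Int.floordiv_eq_ediv_of_pos (by omega)
    have hmul : (n / d) * d = n := Int.ediv_mul_cancel hdvd
    have hnn : 0 ≤ n / d := Int.ediv_nonneg h0.le (by omega)
    have h0' : 0 < PySem.Int.floordiv n d := by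
      rw [hfd]
      rcases hnn.lt_or_eq with hlt | heq
      · exact hlt
      · exfalso
        rw [← hmul, ← heq] at h0
        simp at h0
    have hinv' : ∀ m : Int, 2 ≤ m → m < d → ¬ m ∣ PySem.Int.floordiv n d := by
      intro m hm' hlt hdv
      exact hinv m hm' hlt (dvd_trans hdv (hfd ▸ Int.ediv_dvd_of_dvd hdvd))
    have hres := ih h0' hd hinv'
    rw [bLoop, dif_pos ⟨hsq, hd1⟩, if_pos hm]
    rw [hres]
    have hle : d ≤ n := Int.le_of_dvd h0 hdvd
    have hminN : ∀ m : Nat, 2 ≤ m → m < d.toNat → ¬ m ∣ n.toNat := by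
      intro m hm' hlt hdv
      have hcast : (m : Int) ∣ n := by
        have := Int.natCast_dvd_natCast.mpr hdv
        rwa [Int.toNat_of_nonneg h0.le] at this
      exact hinv (m : Int) (by exact_mod_cast hm') (by omega) hcast
    have hminf : (n.toNat).minFac = d.toNat :=
      pv_minFac_eq n.toNat d.toNat (by omega) (pv_dvd_toNat (by omega) h0.le hdvd) (by omega) hminN
    have hpeel := pvWsum_peel arr n.toNat (by omega)
    rw [hminf] at hpeel
    have htn : (PySem.Int.floordiv n d).toNat = n.toNat / d.toNat := by
      rw [hfd, pv_toNat_ediv n d (by omega) (by omega)]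
    have hci : ((d.toNat : Nat) : Int) = d := Int.toNat_of_nonneg (by omega)
    rw [htn, hpeel, hci]
    have : (if d < (arr.length : Int) then total + (PySem.List.pyGet? arr d).getD 0 else total)
        = total + pvW arr d := by
      rw [pvW]; split_ifs <;> ring
    rw [this]
    ring
  | case2 n d total h hm ih =>
    intro h0 hd hinv
    obtain ⟨hsq, hd1⟩ := h
    have hnd : ¬ d ∣ n := fun hdv => hm ((PySem.Int.mod_eq_zero_iff_dvd n d).mpr hdv)
    have hinv' : ∀ m : Int, 2 ≤ m → m < d + 1 → ¬ m ∣ n := by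
      intro m hm' hlt hdv
      rcases lt_or_eq_of_le (by omega : m ≤ d) with h' | h'
      · exact hinv m hm' h' hdv
      · exact hnd (h' ▸ hdv)
    rw [bLoop, dif_pos ⟨hsq, hd1⟩, if_neg hm]
    exact ih h0 (by omega) hinv'
  | case3 n d total h =>
    intro h0 hd hinv
    rw [bLoop, dif_neg h]
    have hsq : ¬ d * d ≤ n := fun hle => h ⟨hle, by omega⟩
    rcases (by omega : n = 1 ∨ 2 ≤ n) with h1 | h2
    · rw [if_neg (by omega)]
      rw [pvWsum_small arr n.toNat (by omega)]
      ring
    · have hp : n.toNat.Prime := by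
        apply pv_prime_of_no_small n.toNat (by omega)
        intro m hm hmm hdv
        have hcast : (m : Int) ∣ n := by
          have := Int.natCast_dvd_natCast.mpr hdv
          rwa [Int.toNat_of_nonneg h0.le] at this
        have hmmi : (m : Int) * (m : Int) ≤ n := by
          have : ((m * m : Nat) : Int) ≤ ((n.toNat : Nat) : Int) := by exact_mod_cast hmm
          rw [Int.toNat_of_nonneg h0.le] at this
          push_cast at this
          exact this
        have hmd : (m : Int) < d := by nlinarith
        exact hinv (m : Int) (by exact_mod_cast hm) hmd hcast
      have hws : pvWsum arr n.toNat = pvW arr n := by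
        rw [pvWsum_prime arr n.toNat hp, Int.toNat_of_nonneg h0.le]
      rw [hws, pvW]
      by_cases hlen : n < (arr.length : Int)
      · rw [if_pos ⟨by omega, hlen⟩, if_pos hlen]
      · rw [if_neg (by tauto), if_neg hlen]
        ring

-- ===== VERDICT (by name: the statement is the Claim_ definition above) =====
theorem calculate_weighted_sum_spec : Claim_equal_calculate_weighted_sum := by
  intro arr num hdom hpre
  unfold Spec_calculate_weighted_sum
  by_cases harr : arr = []
  · rw [calculate_weighted_sum, calculate_weighted_sum_alt, if_pos harr, if_pos harr]
  · have hnum : 1 ≤ num := by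
      rcases hpre with h | h
      · exact absurd h harr
      · exact h
    obtain ⟨hW, hnd⟩ := pvItemsW_eq_prime_factors arr num hnum
    have hB := bLoop_spec arr num 2 0 (by omega) le_rfl (fun m hm hlt => absurd hlt (by omega))
    simp only [calculate_weighted_sum, calculate_weighted_sum_alt, if_neg harr]
    rw [foldA_eq, hB, zero_add]
    by_cases hany : ((prime_factors num).items.any
        (fun fk => decide (fk.1 < (arr.length : Int)))) = true
    · rw [hany]
      simp only [Bool.false_or, if_true, zero_add]
      exact hW
    · rw [Bool.not_eq_true] at hany
      rw [hany]
      simp only [Bool.or_false, if_false, Bool.false_eq_true]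
      rw [← hW, pvItemsW_zero_of_none arr _ hany]
      ring
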